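-- pv_equiv track=rewrite | github.com/JadElKattar/ScrAPEM-App | extract_ai.py | normalize_ai_output
-- ===== SOURCE A (Python) =====
-- def normalize_ai_output(products):
--     """Normalize AI output to match target column names."""
--     target_columns = [
--         'SERIES', 'MODEL_CODE', 'MOUNTING HOLE', 'BEZEL STYLE', 'TERMINALS',
--         'BEZEL FINISH', 'TYPE OF ILLUMINATION', 'LED COLOR', 'VOLTAGE', 'SEALING'
--     ]
--
--     key_mapping = {
--         'MODEL_CODE': 'MODEL_CODE',
--         'SERIES': 'SERIES',
--         'MOUNTING_HOLE': 'MOUNTING HOLE',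
--         'BEZEL_STYLE': 'BEZEL STYLE',
--         'TERMINALS': 'TERMINALS',
--         'BEZEL_FINISH': 'BEZEL FINISH',
--         'TYPE_OF_ILLUMINATION': 'TYPE OF ILLUMINATION',
--         'LED_COLOR': 'LED COLOR',
--         'VOLTAGE': 'VOLTAGE',
--         'SEALING': 'SEALING'
--     }
--
--     normalized_products = []
--     for product in products:
--         normalized = {col: None for col in target_columns}
--         for key, value in product.items():
--             if value in [None, "null", "", "N/A"]:
--                 continue
--             target_col = key_mapping.get(key)
--             if target_col:
--                 normalized[target_col] = str(value)
--         normalized_products.append(normalized)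
--
--     return normalized_products
-- ===== SOURCE B (Python) =====
-- def normalize_ai_output(products):
--     """Normalize AI output to match target column names (schema-driven)."""
--     col_to_src = [
--         ('SERIES', 'SERIES'), ('MODEL_CODE', 'MODEL_CODE'),
--         ('MOUNTING HOLE', 'MOUNTING_HOLE'), ('BEZEL STYLE', 'BEZEL_STYLE'),
--         ('TERMINALS', 'TERMINALS'), ('BEZEL FINISH', 'BEZEL_FINISH'),
--         ('TYPE OF ILLUMINATION', 'TYPE_OF_ILLUMINATION'),
--         ('LED COLOR', 'LED_COLOR'), ('VOLTAGE', 'VOLTAGE'), ('SEALING', 'SEALING')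
--     ]
--
--     def cell(product, src):
--         val = product.get(src)
--         if val in (None, 'null', '', 'N/A'):
--             return None
--         return str(val)
--
--     return [{col: cell(product, src) for col, src in col_to_src}
--             for product in products]
-- ===== Notes on version B (the rewrite author's own statement) =====
-- stated objective: simpler
-- what changed: B is schema-driven instead of input-driven: one comprehension builds each row by looking up, for each of the 10 fixed target columns, the corresponding source key with product.get, instead of initializing a None-dict and overwriting it while scanning the product's own keys through a key_mapping table; Pre_ only excludes association lists in which a product has duplicate keys, which cannot arise from a Python dict (A's last-occurrence-wins fold vs B's first-match get would disagree there).
import Mathlib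
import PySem

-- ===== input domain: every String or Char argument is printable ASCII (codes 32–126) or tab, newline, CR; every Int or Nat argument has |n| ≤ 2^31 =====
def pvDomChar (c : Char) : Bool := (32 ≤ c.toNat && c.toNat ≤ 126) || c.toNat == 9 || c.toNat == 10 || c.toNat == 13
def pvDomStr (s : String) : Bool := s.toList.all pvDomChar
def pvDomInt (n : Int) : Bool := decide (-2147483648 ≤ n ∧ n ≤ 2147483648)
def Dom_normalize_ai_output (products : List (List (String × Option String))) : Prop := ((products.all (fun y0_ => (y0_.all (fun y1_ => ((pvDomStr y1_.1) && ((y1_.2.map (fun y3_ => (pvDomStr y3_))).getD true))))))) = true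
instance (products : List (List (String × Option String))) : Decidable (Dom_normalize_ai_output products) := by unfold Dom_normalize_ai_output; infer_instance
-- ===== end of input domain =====

-- B normalizes each product by looking the 10 target columns up in the product (schema-driven
-- comprehension) instead of scanning the product's keys and overwriting a pre-filled dict; same results.

-- ===== PORT A =====
-- target_columns literal
def pvTargets : List String :=
  ["SERIES", "MODEL_CODE", "MOUNTING HOLE", "BEZEL STYLE", "TERMINALS",
   "BEZEL FINISH", "TYPE OF ILLUMINATION", "LED COLOR", "VOLTAGE", "SEALING"]

-- key_mapping literal
def pvMapping : PySem.Dict String String := PySem.Dict.mk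
  [("MODEL_CODE", "MODEL_CODE"), ("SERIES", "SERIES"), ("MOUNTING_HOLE", "MOUNTING HOLE"),
   ("BEZEL_STYLE", "BEZEL STYLE"), ("TERMINALS", "TERMINALS"), ("BEZEL_FINISH", "BEZEL FINISH"),
   ("TYPE_OF_ILLUMINATION", "TYPE OF ILLUMINATION"), ("LED_COLOR", "LED COLOR"),
   ("VOLTAGE", "VOLTAGE"), ("SEALING", "SEALING")]

-- `value in [None, "null", "", "N/A"]`
def pvIsSkipped (v : Option String) : Bool :=
  v == none || v == some "null" || v == some "" || v == some "N/A"

-- str(value) on Optional[str]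
def pvStrOf (v : Option String) : String :=
  match v with
  | some s => s
  | none => "None"

-- the body of A's per-product loop; every value of key_mapping is a nonempty string,
-- so Python's truthiness test `if target_col:` is exactly the some-case of the lookup
def pvRowA (product : List (String × Option String)) : List (String × Option String) :=
  let normalized : PySem.Dict String (Option String) :=
    pvTargets.foldl (fun d col => d.insert col none) PySem.Dict.empty
  (product.foldl
    (fun d kv =>
      if pvIsSkipped kv.2 then d
      else
        match pvMapping.get? kv.1 with
        | some target_col => d.insert target_col (some (pvStrOf kv.2))
        | none => d)
    normalized).items

def normalize_ai_output (products : List (List (String × Option String))) : List (List (String × Option String)) :=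
  products.foldl (fun acc product => acc ++ [pvRowA product]) []

-- ===== PORT B =====
-- the col_to_src schema literal of Source B
def pvColSrc : List (String × String) :=
  [("SERIES", "SERIES"), ("MODEL_CODE", "MODEL_CODE"), ("MOUNTING HOLE", "MOUNTING_HOLE"),
   ("BEZEL STYLE", "BEZEL_STYLE"), ("TERMINALS", "TERMINALS"), ("BEZEL FINISH", "BEZEL_FINISH"),
   ("TYPE OF ILLUMINATION", "TYPE_OF_ILLUMINATION"), ("LED COLOR", "LED_COLOR"),
   ("VOLTAGE", "VOLTAGE"), ("SEALING", "SEALING")]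

-- Source B's cell(product, src); product.get(src) gives None both for a missing key and a stored None
def pvCellB (product : List (String × Option String)) (src : String) : Option String :=
  let val : Option String :=
    match (PySem.Dict.mk product).get? src with
    | some v => v
    | none => none
  if val == none || val == some "null" || val == some "" || val == some "N/A" then none
  else some (match val with | some s => s | none => "None")

-- the dict comprehension ranges over the 10 pairwise-distinct column literals, hence is this map
def normalize_ai_output_alt (products : List (List (String × Option String))) : List (List (String × Option String)) :=
  products.map (fun product => pvColSrc.map (fun cs => (cs.1, pvCellB product cs.2)))

-- ===== PRECONDITION & SPEC =====
-- Pre_ excludes only association lists in which some product has duplicate keys: such an input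
-- cannot arise from a Python dict (dict keys are unique), and on it A's last-occurrence-wins scan
-- and B's first-match get are both arbitrary readings of a non-dict.
def Pre_normalize_ai_output (products : List (List (String × Option String))) : Prop :=
  ∀ p ∈ products, (p.map Prod.fst).Nodup
instance (products : List (List (String × Option String))) : Decidable (Pre_normalize_ai_output products) := by unfold Pre_normalize_ai_output; infer_instance

def pvWitness_normalize_ai_output : (List (List (String × Option String))) :=
  [[("SERIES", some "S1"), ("VOLTAGE", none), ("junk", some "x")], []]

def Spec_normalize_ai_output (products : List (List (String × Option String))) (out : List (List (String × Option String))) : Prop := out = normalize_ai_output_alt products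
instance (products : List (List (String × Option String))) (out : List (List (String × Option String))) : Decidable (Spec_normalize_ai_output products out) := by unfold Spec_normalize_ai_output; infer_instance

-- ===== CLAIM (what is proved, stated in full; the proofs are below) =====
def Claim_equal_normalize_ai_output : Prop := ∀ (products : List (List (String × Option String))), Dom_normalize_ai_output products → Pre_normalize_ai_output products → Spec_normalize_ai_output products (normalize_ai_output products)

-- ===== LEMMAS AND PROOFS =====

def pvUpd (p : List (String × Option String)) (c : String) (w : Option String) : Option String :=
  p.foldl
    (fun acc kv =>
      if pvIsSkipped kv.2 then acc
      else if pvMapping.get? kv.1 == some c then some (pvStrOf kv.2) else acc)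
    w

lemma pvFold_items (p : List (String × Option String))
    (d : PySem.Dict String (Option String))
    (hcov : ∀ k t, pvMapping.get? k = some t → d.contains t = true) :
    (p.foldl
      (fun d kv =>
        if pvIsSkipped kv.2 then d
        else
          match pvMapping.get? kv.1 with
          | some target_col => d.insert target_col (some (pvStrOf kv.2))
          | none => d)
      d).items = d.items.map (fun cw => (cw.1, pvUpd p cw.1 cw.2)) := by
  induction p generalizing d with
  | nil => simp [pvUpd]
  | cons kv rest ih =>
    by_cases hsk : pvIsSkipped kv.2
    · simp only [List.foldl_cons, hsk, if_true]
      rw [ih d hcov]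
      refine List.map_congr_left (fun q _ => ?_)
      simp [pvUpd, hsk]
    · simp only [List.foldl_cons, hsk, Bool.false_eq_true, if_false]
      cases hget : pvMapping.get? kv.1 with
      | none =>
        rw [ih d hcov]
        refine List.map_congr_left (fun q _ => ?_)
        simp [pvUpd, hsk, hget]
      | some t =>
        have hcont : d.contains t = true := hcov _ _ hget
        have hcov' : ∀ k t', pvMapping.get? k = some t' → (d.insert t (some (pvStrOf kv.2))).contains t' = true := by
          intro k t' h
          rw [PySem.Dict.contains_insert]
          simp [hcov _ _ h]
        rw [ih _ hcov', PySem.Dict.items_insert_of_contains _ _ hcont, List.map_map]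
        refine List.map_congr_left (fun q _ => ?_)
        by_cases hq : q.1 = t
        · simp only [Function.comp, hq, beq_self_eq_true, if_true]
          simp [pvUpd, hsk, hget]
        · have : (q.1 == t) = false := by simp [hq]
          simp only [Function.comp, this, Bool.false_eq_true, if_false]
          simp [pvUpd, hsk, hget, Ne.symm hq]

lemma pvUpd_of_not_mem (rest : List (String × Option String)) (c s : String)
    (hcs : ∀ k, pvMapping.get? k = some c ↔ k = s)
    (hs : s ∉ rest.map Prod.fst) (w : Option String) :
    pvUpd rest c w = w := by
  induction rest generalizing w with
  | nil => rfl
  | cons kv tail ih =>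
    obtain ⟨k, v⟩ := kv
    have hk : k ≠ s := fun h => hs (by simp [← h])
    have hne : (pvMapping.get? k == some c) = false := by
      simp only [beq_eq_false_iff_ne, ne_eq]
      exact fun h => hk ((hcs k).mp h)
    have hs' : s ∉ tail.map Prod.fst := fun h => hs (by simp [h])
    have hstep : pvUpd ((k, v) :: tail) c w = pvUpd tail c w := by
      simp only [pvUpd, List.foldl_cons, hne, Bool.false_eq_true, if_false, ite_self]
    rw [hstep]
    exact ih hs' w

lemma pvUpd_eq_cellB (p : List (String × Option String)) (c s : String)
    (hcs : ∀ k, pvMapping.get? k = some c ↔ k = s)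
    (hnd : (p.map Prod.fst).Nodup) :
    pvUpd p c none = pvCellB p s := by
  induction p with
  | nil => rfl
  | cons kv rest ih =>
    obtain ⟨k, v⟩ := kv
    have hnd2 : (k :: rest.map Prod.fst).Nodup := by simpa using hnd
    rcases List.nodup_cons.mp hnd2 with ⟨hk, hnd'⟩
    by_cases hks : k = s
    · have hget : pvMapping.get? k = some c := (hcs k).mpr hks
      have hrest : ∀ w, pvUpd rest c w = w :=
        pvUpd_of_not_mem rest c s hcs (hks ▸ hk)
      by_cases hsk : pvIsSkipped v
      · have hcell : pvCellB ((k, v) :: rest) s = none := by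
          rcases hv : v with _ | x <;>
            simp_all [pvCellB, pvIsSkipped, PySem.Dict.get?_mk_cons]
        rw [hcell]
        simpa [pvUpd, hsk] using hrest none
      · have hcell : pvCellB ((k, v) :: rest) s = some (pvStrOf v) := by
          rcases hv : v with _ | x <;>
            simp_all [pvCellB, pvIsSkipped, pvStrOf, PySem.Dict.get?_mk_cons]
        rw [hcell]
        simpa [pvUpd, hsk, hget] using hrest (some (pvStrOf v))
    · have hne : (pvMapping.get? k == some c) = false := by
        simp only [beq_eq_false_iff_ne, ne_eq]
        exact fun h => hks ((hcs k).mp h)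
      have hcell : pvCellB ((k, v) :: rest) s = pvCellB rest s := by
        simp [pvCellB, PySem.Dict.get?_mk_cons, hks]
      have hstep : pvUpd ((k, v) :: rest) c none = pvUpd rest c none := by
        simp only [pvUpd, List.foldl_cons, hne, Bool.false_eq_true, if_false, ite_self]
      rw [hcell, hstep, ih hnd']

lemma pvMapping_inv (c s : String) (hmem : (c, s) ∈ pvColSrc) :
    ∀ k, pvMapping.get? k = some c ↔ k = s := by
  intro k
  constructor
  · intro h
    have hm := PySem.Dict.mem_items_of_get?_eq_some _ h
    simp only [pvColSrc, List.mem_cons, List.not_mem_nil, or_false, Prod.mk.injEq] at hmem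
    rcases hmem with ⟨rfl, rfl⟩ | ⟨rfl, rfl⟩ | ⟨rfl, rfl⟩ | ⟨rfl, rfl⟩ | ⟨rfl, rfl⟩ |
      ⟨rfl, rfl⟩ | ⟨rfl, rfl⟩ | ⟨rfl, rfl⟩ | ⟨rfl, rfl⟩ | ⟨rfl, rfl⟩ <;>
      · simp only [pvMapping, List.mem_cons, List.not_mem_nil, or_false,
          Prod.mk.injEq] at hm
        simp_all
  · rintro rfl
    simp only [pvColSrc, List.mem_cons, List.not_mem_nil, or_false, Prod.mk.injEq] at hmem
    rcases hmem with ⟨rfl, rfl⟩ | ⟨rfl, rfl⟩ | ⟨rfl, rfl⟩ | ⟨rfl, rfl⟩ | ⟨rfl, rfl⟩ |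
      ⟨rfl, rfl⟩ | ⟨rfl, rfl⟩ | ⟨rfl, rfl⟩ | ⟨rfl, rfl⟩ | ⟨rfl, rfl⟩ <;>
      simp [pvMapping, PySem.Dict.get?_mk_cons]

lemma pvRow_eq (p : List (String × Option String)) (hnd : (p.map Prod.fst).Nodup) :
    pvRowA p = pvColSrc.map (fun cs => (cs.1, pvCellB p cs.2)) := by
  have hcov : ∀ k t, pvMapping.get? k = some t →
      (pvTargets.foldl (fun d col => d.insert col none)
        (PySem.Dict.empty : PySem.Dict String (Option String))).contains t = true := by
    intro k t h
    have hm := PySem.Dict.mem_items_of_get?_eq_some _ h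
    simp only [pvMapping, List.mem_cons, List.not_mem_nil, or_false, Prod.mk.injEq] at hm
    rcases hm with ⟨_, rfl⟩ | ⟨_, rfl⟩ | ⟨_, rfl⟩ | ⟨_, rfl⟩ | ⟨_, rfl⟩ |
      ⟨_, rfl⟩ | ⟨_, rfl⟩ | ⟨_, rfl⟩ | ⟨_, rfl⟩ | ⟨_, rfl⟩ <;> rfl
  unfold pvRowA
  rw [pvFold_items p _ hcov]
  have hitems : (pvTargets.foldl (fun d col => d.insert col none)
      (PySem.Dict.empty : PySem.Dict String (Option String))).items
      = pvTargets.map (fun c => (c, (none : Option String))) := by rfl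
  rw [hitems, List.map_map]
  simp only [pvTargets, pvColSrc, List.map_cons, List.map_nil, Function.comp,
    List.cons.injEq, Prod.mk.injEq, and_true]
  repeat' constructor
  all_goals first
    | rfl
    | exact pvUpd_eq_cellB p _ _ (pvMapping_inv _ _ (by simp [pvColSrc])) hnd

-- ===== VERDICT (by name: the statement is the Claim_ definition above) =====
theorem normalize_ai_output_spec : Claim_equal_normalize_ai_output := by
  intro products _hdom hpre
  unfold Spec_normalize_ai_output normalize_ai_output normalize_ai_output_alt
  rw [PySem.List.foldl_append_singleton_eq_map]
  exact List.map_congr_left (fun p hp => pvRow_eq p (hpre p hp))
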